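-- pv_equiv track=rewrite | github.com/cflores124568/multimedia-pipeline-system | phase3/multimedia-review-system.py | clean_up_path
-- ===== SOURCE A (Python) =====
-- PATH_KEYWORDS = ['production', 'baselightfilesystem1']
--
-- def clean_up_path(file_path):
--     #Strip path to relevant portion after known keywords
--     for keyword in PATH_KEYWORDS:
--         if keyword in file_path:
--             parts = file_path.split('/')
--             for i in range(len(parts)):
--                 if parts[i] == keyword:
--                     return '/'.join(parts[i+1:])
--     return file_path
-- ===== SOURCE B (Python) =====
-- PATH_KEYWORDS = ['production', 'baselightfilesystem1']
--
-- def clean_up_path(file_path):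
--     # Pure substring search: a segment equal to keyword is exactly an occurrence of the
--     # slash-delimited keyword in the slash-padded path; no splitting into parts at all.
--     padded = '/' + file_path + '/'
--     for keyword in PATH_KEYWORDS:
--         idx = padded.find('/' + keyword + '/')
--         if idx != -1:
--             return file_path[idx + len(keyword) + 1:]
--     return file_path
-- ===== Notes on version B (the rewrite author's own statement) =====
-- stated objective: alternative
-- what changed: A splits the path into a segment list and scans it per keyword; B never splits: it pads the path with slashes and does one search per keyword for the slash-delimited keyword as a substring, then returns a direct string slice after the match.
import Mathlib
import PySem

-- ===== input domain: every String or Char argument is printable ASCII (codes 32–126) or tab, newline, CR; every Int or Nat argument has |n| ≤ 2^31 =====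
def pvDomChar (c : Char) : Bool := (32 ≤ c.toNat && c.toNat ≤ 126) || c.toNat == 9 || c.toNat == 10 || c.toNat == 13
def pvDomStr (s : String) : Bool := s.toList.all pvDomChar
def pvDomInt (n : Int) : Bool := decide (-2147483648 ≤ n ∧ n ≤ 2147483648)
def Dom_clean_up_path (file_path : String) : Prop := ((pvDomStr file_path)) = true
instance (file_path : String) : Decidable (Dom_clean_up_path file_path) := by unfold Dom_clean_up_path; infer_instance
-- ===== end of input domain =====

-- B replaces A's split-into-segments-and-scan by a plain substring search for '/keyword/'
-- in the slash-padded path followed by a direct slice (objective: alternative).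

-- ===== PORT A =====
-- PATH_KEYWORDS module constant (shared by both sources)
def pvPathKeywords : List String := ["production", "baselightfilesystem1"]

-- A's inner loop: for i in range(len(parts)): if parts[i] == keyword: return '/'.join(parts[i+1:])
-- (some = the early return, none = the loop fell through)
def pvInnerA (parts : List String) (keyword : String) (i : Nat) : Option String :=
  if h : i < parts.length then
    if parts[i] == keyword then
      some (PySem.Str.join "/" (PySem.List.slice parts (some ((i : Int) + 1)) none))
    else pvInnerA parts keyword (i + 1)
  else none
termination_by parts.length - i

-- A's outer loop: for keyword in PATH_KEYWORDS: if keyword in file_path: …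
-- (file_path.split('/') with the nonempty literal '/' never raises, so .getD [] is never taken)
def pvOuterA (file_path : String) : List String → String
  | [] => file_path
  | keyword :: rest =>
      if PySem.Str.isIn keyword file_path then
        match pvInnerA ((PySem.Str.split? file_path "/").getD []) keyword 0 with
        | some r => r
        | none => pvOuterA file_path rest
      else pvOuterA file_path rest

def clean_up_path (file_path : String) : String := pvOuterA file_path pvPathKeywords

-- ===== PORT B =====
-- B's keyword loop: for keyword in PATH_KEYWORDS:
--   idx = padded.find('/' + keyword + '/'); if idx != -1: return file_path[idx + len(keyword) + 1:]
def pvOuterB (file_path padded : String) : List String → String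
  | [] => file_path
  | keyword :: rest =>
      let idx := PySem.Str.find padded ("/" ++ keyword ++ "/")
      if idx ≠ -1 then
        PySem.Str.slice file_path (some (idx + PySem.Str.len keyword + 1)) none
      else pvOuterB file_path padded rest

-- padded = '/' + file_path + '/' is computed once, before the loop
def clean_up_path_alt (file_path : String) : String :=
  pvOuterB file_path ("/" ++ file_path ++ "/") pvPathKeywords

-- ===== PRECONDITION & SPEC =====
def Spec_clean_up_path (file_path : String) (out : String) : Prop := out = clean_up_path_alt file_path
instance (file_path : String) (out : String) : Decidable (Spec_clean_up_path file_path out) := by unfold Spec_clean_up_path; infer_instance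

-- ===== CLAIM (what is proved, stated in full; the proofs are below) =====
def Claim_equal_clean_up_path : Prop := ∀ (file_path : String), Dom_clean_up_path file_path → Spec_clean_up_path file_path (clean_up_path file_path)

-- ===== LEMMAS AND PROOFS =====

-- the common specification both per-keyword searches are reduced to: strip after the first
-- segment equal to k, segment by segment
def pvSpecF (k s : List Char) : Option (List Char) :=
  if s.takeWhile (· != '/') = k then some (s.drop (k.length + 1))
  else if h : (s.takeWhile (· != '/')).length < s.length then
    pvSpecF k (s.drop ((s.takeWhile (· != '/')).length + 1))
  else none
termination_by s.length
decreasing_by simp; omega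

-- ---- splitOn bridge: PySem's splitOn on ['/'] is core splitOnP (· == '/') ----
lemma pv_go_eq (fuel : Nat) : ∀ (l cur : List Char) (acc : List (List Char)), l.length < fuel →
    PySem.Chars.splitOn.go ['/'] fuel l cur acc =
      acc.reverse ++ (l.splitOnP (· == '/')).modifyHead (cur.reverse ++ ·) := by
  induction fuel with
  | zero => intro l cur acc h; omega
  | succ fuel ih =>
      intro l cur acc h
      cases l with
      | nil =>
          rw [PySem.Chars.splitOn.go]
          simp [List.splitOnP_nil]
          all_goals omega
      | cons c rest =>
          rw [PySem.Chars.splitOn.go]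
          by_cases hc : c = '/'
          · subst hc
            have hpre : (['/'] : List Char).isPrefixOf ('/' :: rest) = true := by
              simp [List.isPrefixOf]
            rw [if_pos hpre]
            have hd : List.drop (['/'] : List Char).length ('/' :: rest) = rest := rfl
            rw [hd, ih rest [] (cur.reverse :: acc) (by simpa using Nat.lt_of_succ_lt_succ h)]
            rw [List.splitOnP_cons]
            have hid : (fun x : List Char => ([] : List Char).reverse ++ x) = id := by
              funext x; simp
            rw [hid, List.modifyHead_id, id_eq]
            simp only [beq_self_eq_true, if_true, List.modifyHead_cons, List.reverse_cons,
              List.append_assoc, List.singleton_append, List.append_nil]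
          · have hpre : (['/'] : List Char).isPrefixOf (c :: rest) = false := by
              simp [List.isPrefixOf]
              exact fun hh => hc hh.symm
            rw [if_neg (by simp [hpre]), ih rest (c :: cur) acc (by simpa using Nat.lt_of_succ_lt_succ h)]
            rw [List.splitOnP_cons]
            have hb : (c == '/') = false := by simpa using hc
            rw [hb]
            simp only [Bool.false_eq_true, if_false, List.modifyHead_modifyHead]
            cases List.splitOnP (· == '/') rest with
            | nil => simp [List.modifyHead]
            | cons hd tl => simp [List.modifyHead]

lemma pv_splitOn_eq (s : List Char) :
    PySem.Chars.splitOn s ['/'] = s.splitOnP (· == '/') := by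
  have h := pv_go_eq (s.length + 1) s [] [] (by omega)
  rw [show PySem.Chars.splitOn s ['/'] = PySem.Chars.splitOn.go ['/'] (s.length + 1) s [] [] from rfl, h]
  have hid : (fun x : List Char => ([] : List Char).reverse ++ x) = id := by funext x; simp
  rw [hid, List.modifyHead_id, id_eq]
  simp

-- ---- decomposition of splitOnP along the first slash ----
lemma pv_splitOnP_no_slash (s : List Char) (h : ∀ c ∈ s, c ≠ '/') :
    s.splitOnP (· == '/') = [s] := by
  induction s with
  | nil => simp [List.splitOnP_nil]
  | cons c t ih =>
      have hc : (c == '/') = false := by simpa using h c (by simp)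
      rw [List.splitOnP_cons, hc]
      simp only [Bool.false_eq_true, if_false]
      rw [ih (fun x hx => h x (by simp [hx]))]
      rfl

lemma pv_splitOnP_slash (a r : List Char) (h : ∀ c ∈ a, c ≠ '/') :
    (a ++ '/' :: r).splitOnP (· == '/') = a :: r.splitOnP (· == '/') := by
  induction a with
  | nil => simp [List.splitOnP_cons]
  | cons c t ih =>
      have hc : (c == '/') = false := by simpa using h c (by simp)
      rw [List.cons_append, List.splitOnP_cons, hc]
      simp only [Bool.false_eq_true, if_false]
      rw [ih (fun x hx => h x (by simp [hx]))]
      rfl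

lemma pv_dropWhile_head {p : Char → Bool} : ∀ (s : List Char) {c : Char} {r : List Char},
    s.dropWhile p = c :: r → p c = false := by
  intro s
  induction s with
  | nil => intro c r h; simp [List.dropWhile] at h
  | cons x t ih =>
      intro c r h
      rw [List.dropWhile_cons] at h
      by_cases hx : p x = true
      · rw [if_pos hx] at h; exact ih h
      · rw [if_neg hx] at h
        cases h
        simpa using hx

-- ---- prefix of the padded string vs. the first segment ----
lemma pv_seg_prefix (k s : List Char) (h : s.takeWhile (· != '/') = k) :
    k ++ ['/'] <+: s ++ ['/'] := by
  have hs := List.takeWhile_append_dropWhile (p := fun c => c != '/') (l := s)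
  rw [h] at hs
  cases hd : s.dropWhile (· != '/') with
  | nil =>
      rw [hd] at hs
      simp only [List.append_nil] at hs
      rw [← hs]
  | cons c r =>
      have hc := pv_dropWhile_head (p := fun x => x != '/') s hd
      have hc' : c = '/' := by simpa using hc
      subst hc'
      rw [hd] at hs
      rw [← hs]
      exact ⟨r ++ ['/'], by simp⟩

lemma pv_prefix_seg (k : List Char) (hk : ('/' : Char) ∉ k) : ∀ (s : List Char),
    k ++ ['/'] <+: s ++ ['/'] → s.takeWhile (· != '/') = k := by
  induction k with
  | nil =>
      intro s h
      cases s with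
      | nil => rfl
      | cons c t =>
          simp only [List.nil_append, List.cons_append] at h
          rcases List.cons_prefix_cons.mp h with ⟨hc, -⟩
          rw [List.takeWhile_cons]
          simp [← hc]
  | cons c k' ih =>
      have hc : c ≠ '/' := fun hh => hk (by simp [hh])
      intro s h
      cases s with
      | nil =>
          simp only [List.cons_append, List.nil_append] at h
          rcases List.cons_prefix_cons.mp h with ⟨hc', hrest⟩
          exact absurd hc' hc
      | cons c0 t =>
          simp only [List.cons_append] at h
          rcases List.cons_prefix_cons.mp h with ⟨hc', hrest⟩
          subst hc'
          rw [List.takeWhile_cons]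
          have : (c != '/') = true := by simpa using hc
          rw [this]
          simp only [if_true]
          rw [ih (fun hh => hk (by simp [hh])) t hrest]

-- ---- find: first occurrence pinned, and shifting past a prefix free of occurrences ----
lemma pv_find_eq (pd nd : List Char) (t : Nat) (hp : nd <+: pd.drop t)
    (hmin : ∀ i < t, ¬ nd <+: pd.drop i) : PySem.Chars.find pd nd = t := by
  have hin : PySem.Chars.isIn nd pd = true :=
    (PySem.Chars.exists_prefix_drop_iff_isIn nd pd).mp ⟨t, hp⟩
  have hinf : nd <:+: pd := (PySem.Chars.isIn_iff_infix nd pd).mp hin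
  have h0 : 0 ≤ PySem.Chars.find pd nd := (PySem.Chars.find_nonneg_iff pd nd).mpr hinf
  obtain ⟨hp', hmin'⟩ := PySem.Chars.find_spec h0
  have ht : (PySem.Chars.find pd nd).toNat = t := by
    rcases Nat.lt_trichotomy (PySem.Chars.find pd nd).toNat t with hlt | he | hgt
    · exact absurd hp' (hmin _ hlt)
    · exact he
    · exact absurd hp (hmin' t hgt)
  omega

lemma pv_find_shift (pd nd : List Char) (m : Nat) (hm : m ≤ pd.length)
    (h : ∀ i < m, ¬ nd <+: pd.drop i) :
    PySem.Chars.find pd nd =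
      if PySem.Chars.find (pd.drop m) nd = -1 then -1
      else m + PySem.Chars.find (pd.drop m) nd := by
  by_cases hf : PySem.Chars.find (pd.drop m) nd = -1
  · rw [if_pos hf]
    rw [PySem.Chars.find_eq_neg_one_iff] at hf ⊢
    intro hinf
    apply hf
    obtain ⟨j, hj⟩ := (PySem.Chars.exists_prefix_drop_iff_isIn nd pd).mpr
      ((PySem.Chars.isIn_iff_infix nd pd).mpr hinf)
    have hjm : m ≤ j := by
      by_contra hh
      exact h j (by omega) hj
    have hj' : nd <+: (pd.drop m).drop (j - m) := by
      rw [List.drop_drop, show m + (j - m) = j by omega]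
      exact hj
    exact (PySem.Chars.isIn_iff_infix nd (pd.drop m)).mp
      ((PySem.Chars.exists_prefix_drop_iff_isIn nd (pd.drop m)).mp ⟨j - m, hj'⟩)
  · rw [if_neg hf]
    have h0 : 0 ≤ PySem.Chars.find (pd.drop m) nd := by
      have := PySem.Chars.neg_one_le_find (pd.drop m) nd
      omega
    obtain ⟨hp', hmin'⟩ := PySem.Chars.find_spec h0
    have heq : PySem.Chars.find pd nd = ((m + (PySem.Chars.find (pd.drop m) nd).toNat : Nat) : Int) := by
      apply pv_find_eq
      · rw [← List.drop_drop]
        exact hp'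
      · intro i hi
        by_cases him : i < m
        · exact h i him
        · intro hpre
          have hpre' : nd <+: (pd.drop m).drop (i - m) := by
            rw [List.drop_drop, show m + (i - m) = i by omega]
            exact hpre
          exact hmin' (i - m) (by omega) hpre'
    rw [heq]
    push_cast
    omega

-- no occurrence of '/k/' can start before the slash that ends the first segment
lemma pv_no_early (k s : List Char) (hk : ('/' : Char) ∉ k)
    (hne : s.takeWhile (· != '/') ≠ k) :
    ∀ i < (s.takeWhile (· != '/')).length + 1,
      ¬ ('/' :: (k ++ ['/'])) <+: (('/' :: (s ++ ['/'])).drop i) := by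
  intro i hi hpre
  cases i with
  | zero =>
      simp only [List.drop_zero] at hpre
      rcases List.cons_prefix_cons.mp hpre with ⟨-, h2⟩
      exact hne (pv_prefix_seg k hk s h2)
  | succ j =>
      have hj : j < (s.takeWhile (· != '/')).length := by omega
      have hjs : j < s.length := lt_of_lt_of_le hj (List.takeWhile_prefix _).length_le
      rw [List.drop_succ_cons] at hpre
      obtain ⟨t, ht⟩ := hpre
      have h0 : ((s ++ ['/']).drop j)[0]? = some '/' := by rw [← ht]; rfl
      rw [List.getElem?_drop, Nat.add_zero, List.getElem?_append_left hjs,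
        List.getElem?_eq_getElem hjs] at h0
      have hsj : s[j] = '/' := by simpa using h0
      have hta : (s.takeWhile (· != '/'))[j] = s[j] := (List.takeWhile_prefix _).getElem hj
      have hmem : (s.takeWhile (· != '/'))[j] ∈ s.takeWhile (· != '/') := List.getElem_mem hj
      have := List.mem_takeWhile_imp hmem
      rw [hta, hsj] at this
      simp at this

-- ---- the two sides equal the common spec ----
-- A side, on the splitOnP list
lemma pv_A_spec (k : List Char) : ∀ (n : Nat) (s : List Char), s.length ≤ n →
    ((s.splitOnP (· == '/')).findIdx? (· == k)).map
        (fun j => ['/'].intercalate ((s.splitOnP (· == '/')).drop (j + 1))) = pvSpecF k s := by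
  intro n
  induction n with
  | zero =>
      intro s hs
      have hs0 : s = [] := by cases s with | nil => rfl | cons a b => simp at hs
      subst hs0
      rw [pvSpecF]
      simp only [List.splitOnP_nil, List.takeWhile_nil]
      by_cases hk : ([] : List Char) = k
      · subst hk
        simp
        rfl
      · have hb : (([] : List Char) == k) = false := by simpa using hk
        simp [List.findIdx?_cons, hb, hk]
  | succ n ih =>
      intro s hs
      have hamem : ∀ c ∈ s.takeWhile (· != '/'), c ≠ '/' :=
        fun c hc => by simpa using List.mem_takeWhile_imp hc
      have hsplit := List.takeWhile_append_dropWhile (p := fun c => c != '/') (l := s)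
      cases hd : s.dropWhile (· != '/') with
      | nil =>
          have hsa : s.takeWhile (· != '/') = s := by
            rw [hd] at hsplit
            simpa using hsplit
          have hsp : s.splitOnP (· == '/') = [s] := pv_splitOnP_no_slash s (hsa ▸ hamem)
          rw [hsp, pvSpecF, hsa]
          by_cases hak : s = k
          · subst hak
            simp
            rw [show ['/'].intercalate ([] : List (List Char)) = [] from rfl,
              List.drop_eq_nil_of_le (by omega)]
          · have hb : (s == k) = false := by simpa using hak
            have hlt : ¬ s.length < s.length := by omega
            simp [List.findIdx?_cons, hb, hak, hsa, hlt]
      | cons c r =>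
          have hc : c = '/' := by
            have := pv_dropWhile_head (p := fun x => x != '/') s hd
            simpa using this
          subst hc
          rw [hd] at hsplit
          have hsp : s.splitOnP (· == '/') =
              (s.takeWhile (· != '/')) :: r.splitOnP (· == '/') := by
            conv_lhs => rw [← hsplit]
            exact pv_splitOnP_slash _ r hamem
          have hlen := congrArg List.length hsplit
          simp at hlen
          have hr : r.length ≤ n := by omega
          rw [hsp, pvSpecF, List.findIdx?_cons]
          by_cases hak : s.takeWhile (· != '/') = k
          · have hb : ((s.takeWhile (· != '/')) == k) = true := by simpa using hak
            rw [hb, if_pos rfl, if_pos hak]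
            simp only [Option.map_some, List.drop_succ_cons, List.drop_zero]
            rw [show List.splitOnP (· == '/') r = List.splitOn '/' r from rfl,
              List.intercalate_splitOn r '/']
            have hdrop0 : s.drop ((s.takeWhile (· != '/')).length + 1) = r := by
              generalize s.takeWhile (· != '/') = A at hsplit ⊢
              rw [← hsplit]
              simp [List.drop_append]
            have hdk : s.drop (k.length + 1) = r := by
              rw [← hak]
              exact hdrop0
            rw [hdk]
          · have hb : ((s.takeWhile (· != '/')) == k) = false := by simpa using hak
            have hlt : (s.takeWhile (· != '/')).length < s.length := by omega
            rw [hb, if_neg (by simp), if_neg hak, dif_pos hlt]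
            have hdrop : s.drop ((s.takeWhile (· != '/')).length + 1) = r := by
              generalize s.takeWhile (· != '/') = A at hsplit ⊢
              rw [← hsplit]
              simp [List.drop_append]
            rw [hdrop, ← ih r hr, Option.map_map]
            cases (r.splitOnP (· == '/')).findIdx? (· == k) with
            | none => rfl
            | some j => simp

-- find hits position 0 when the first segment is k
lemma pv_B_hit (k s : List Char) (hak : s.takeWhile (· != '/') = k) :
    PySem.Chars.find ('/' :: (s ++ ['/'])) ('/' :: (k ++ ['/'])) = 0 := by
  have hpre0 : ('/' :: (k ++ ['/'])) <+: ('/' :: (s ++ ['/'])) :=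
    List.cons_prefix_cons.mpr ⟨rfl, pv_seg_prefix k s hak⟩
  exact pv_find_eq _ _ 0 (by simpa using hpre0) (fun i hi => absurd hi (by omega))

-- no slash in s and first segment ≠ k: find misses entirely
lemma pv_B_miss_noslash (k s : List Char) (hk : ('/' : Char) ∉ k)
    (hak : s.takeWhile (· != '/') ≠ k) (hd : s.dropWhile (· != '/') = []) :
    PySem.Chars.find ('/' :: (s ++ ['/'])) ('/' :: (k ++ ['/'])) = -1 := by
  have hsplit := List.takeWhile_append_dropWhile (p := fun c => c != '/') (l := s)
  rw [hd] at hsplit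
  have hsa : s.takeWhile (· != '/') = s := by simpa using hsplit
  have hne := pv_no_early k s hk hak
  rw [hsa] at hne
  have hshift := pv_find_shift ('/' :: (s ++ ['/'])) ('/' :: (k ++ ['/'])) (s.length + 1)
    (by simp) hne
  have hdropm : ('/' :: (s ++ ['/'])).drop (s.length + 1) = ['/'] := by
    rw [List.drop_succ_cons]
    exact List.drop_left
  have h1 : PySem.Chars.find ['/'] ('/' :: (k ++ ['/'])) = -1 := by
    rw [PySem.Chars.find_eq_neg_one_iff]
    intro hinf
    have := hinf.length_le
    simp at this
  rw [hdropm, h1] at hshift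
  simpa using hshift

-- dropping past the first segment and its slash
lemma pv_drop_shift (A t : List Char) (m : Nat) :
    (A ++ '/' :: t).drop (A.length + 1 + m) = t.drop m := by
  rw [List.drop_append]
  have h1 : A.drop (A.length + 1 + m) = [] := List.drop_eq_nil_of_le (by omega)
  have h2 : A.length + 1 + m - A.length = m + 1 := by omega
  rw [h1, h2, List.nil_append, List.drop_succ_cons]

-- B side, on the padded character list
lemma pv_B_spec (k : List Char) (hk : ('/' : Char) ∉ k) : ∀ (n : Nat) (s : List Char), s.length ≤ n →
    (if PySem.Chars.find ('/' :: (s ++ ['/'])) ('/' :: (k ++ ['/'])) = -1 then none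
     else some (s.drop ((PySem.Chars.find ('/' :: (s ++ ['/'])) ('/' :: (k ++ ['/']))).toNat
                        + k.length + 1))) = pvSpecF k s := by
  intro n
  induction n with
  | zero =>
      intro s hs
      have hs0 : s = [] := by cases s with | nil => rfl | cons a b => simp at hs
      subst hs0
      by_cases hak : ([] : List Char).takeWhile (· != '/') = k
      · rw [pv_B_hit k [] hak, if_neg (by omega), pvSpecF, if_pos hak]
        simp
      · rw [pv_B_miss_noslash k [] hk hak rfl, if_pos rfl, pvSpecF, if_neg hak]
        simp
  | succ n ih =>
      intro s hs
      by_cases hak : s.takeWhile (· != '/') = k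
      · rw [pv_B_hit k s hak, if_neg (by omega), pvSpecF, if_pos hak]
        simp
      · have hamem : ∀ c ∈ s.takeWhile (· != '/'), c ≠ '/' :=
          fun c hc => by simpa using List.mem_takeWhile_imp hc
        have hsplit := List.takeWhile_append_dropWhile (p := fun c => c != '/') (l := s)
        cases hd : s.dropWhile (· != '/') with
        | nil =>
            rw [hd] at hsplit
            have hsa : s.takeWhile (· != '/') = s := by simpa using hsplit
            rw [pv_B_miss_noslash k s hk hak hd, if_pos rfl, pvSpecF, if_neg hak,
              dif_neg (by rw [hsa]; omega)]
        | cons c r =>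
            have hc : c = '/' := by
              have := pv_dropWhile_head (p := fun x => x != '/') s hd
              simpa using this
            subst hc
            rw [hd] at hsplit
            have hlen := congrArg List.length hsplit
            simp at hlen
            have hr : r.length ≤ n := by omega
            have hlt : (s.takeWhile (· != '/')).length < s.length := by omega
            have hdrop0 : s.drop ((s.takeWhile (· != '/')).length + 1) = r := by
              generalize s.takeWhile (· != '/') = A at hsplit ⊢
              rw [← hsplit]
              simp [List.drop_append]
            have hspecs : pvSpecF k s = pvSpecF k r := by
              rw [pvSpecF, if_neg hak, dif_pos hlt, hdrop0]
            have hne := pv_no_early k s hk hak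
            have hm : (s.takeWhile (· != '/')).length + 1 ≤ ('/' :: (s ++ ['/'])).length := by
              simp
              omega
            have hshift := pv_find_shift ('/' :: (s ++ ['/'])) ('/' :: (k ++ ['/']))
              ((s.takeWhile (· != '/')).length + 1) hm hne
            have hdropm : ('/' :: (s ++ ['/'])).drop ((s.takeWhile (· != '/')).length + 1) =
                '/' :: (r ++ ['/']) := by
              generalize s.takeWhile (· != '/') = A at hsplit ⊢
              rw [List.drop_succ_cons, ← hsplit, List.append_assoc]
              exact List.drop_left
            rw [hdropm] at hshift
            have hih := ih r hr
            by_cases hf : PySem.Chars.find ('/' :: (r ++ ['/'])) ('/' :: (k ++ ['/'])) = -1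
            · rw [hf] at hshift
              simp at hshift
              rw [hshift, if_pos rfl, hspecs, ← hih, if_pos hf]
            · have h0 : 0 ≤ PySem.Chars.find ('/' :: (r ++ ['/'])) ('/' :: (k ++ ['/'])) := by
                have := PySem.Chars.neg_one_le_find ('/' :: (r ++ ['/'])) ('/' :: (k ++ ['/']))
                omega
              rw [if_neg hf] at hshift
              have hfe : PySem.Chars.find ('/' :: (s ++ ['/'])) ('/' :: (k ++ ['/'])) ≠ -1 := by
                omega
              rw [if_neg hfe, hspecs, ← hih, if_neg hf]
              congr 1
              have htn : (PySem.Chars.find ('/' :: (s ++ ['/'])) ('/' :: (k ++ ['/']))).toNat =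
                  (s.takeWhile (· != '/')).length + 1 +
                    (PySem.Chars.find ('/' :: (r ++ ['/'])) ('/' :: (k ++ ['/']))).toNat := by
                omega
              rw [htn]
              have : (s.takeWhile (· != '/')).length + 1 +
                    (PySem.Chars.find ('/' :: (r ++ ['/'])) ('/' :: (k ++ ['/']))).toNat +
                    k.length + 1 =
                  (s.takeWhile (· != '/')).length + 1 +
                    ((PySem.Chars.find ('/' :: (r ++ ['/'])) ('/' :: (k ++ ['/']))).toNat +
                      k.length + 1) := by omega
              rw [this]
              generalize s.takeWhile (· != '/') = A at hsplit ⊢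
              rw [← hsplit]
              exact pv_drop_shift A r _

-- when k is not a substring of s at all, the spec finds nothing
lemma pv_specF_none (k : List Char) : ∀ (n : Nat) (s : List Char), s.length ≤ n →
    ¬ (k <:+: s) → pvSpecF k s = none := by
  intro n
  induction n with
  | zero =>
      intro s hs hinf
      have hs0 : s = [] := by cases s with | nil => rfl | cons a b => simp at hs
      subst hs0
      rw [pvSpecF]
      by_cases hk : ([] : List Char).takeWhile (· != '/') = k
      · exfalso
        apply hinf
        rw [← hk]
        simp
      · rw [if_neg hk]
        simp
  | succ n ih =>
      intro s hs hinf
      rw [pvSpecF]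
      by_cases hak : s.takeWhile (· != '/') = k
      · exfalso
        apply hinf
        rw [← hak]
        exact (List.takeWhile_prefix _).isInfix
      · rw [if_neg hak]
        by_cases hlt : (s.takeWhile (· != '/')).length < s.length
        · rw [dif_pos hlt]
          apply ih
          · have := List.length_drop (l := s) (i := (s.takeWhile (· != '/')).length + 1)
            omega
          · intro hinf2
            exact hinf (hinf2.trans (List.drop_suffix _ _).isInfix)
        · rw [dif_neg hlt]

-- the index-loop of A characterised as a findIdx? on the dropped tail (from i)
lemma pv_join_slice_congr (parts : List String) {a b : Int} (h : a = b) :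
    PySem.Str.join "/" (PySem.List.slice parts (some a)) =
      PySem.Str.join "/" (PySem.List.slice parts (some b)) := by rw [h]

lemma pv_innerA_eq (parts : List String) (k : String) : ∀ (n i : Nat), parts.length - i ≤ n →
    pvInnerA parts k i =
      ((parts.drop i).findIdx? (· == k)).map
        (fun j => PySem.Str.join "/" (PySem.List.slice parts (some (((i + j : Nat) : Int) + 1)) none)) := by
  intro n
  induction n with
  | zero =>
      intro i hi
      have hge : parts.length ≤ i := by omega
      rw [pvInnerA]
      simp [Nat.not_lt.mpr hge, List.drop_eq_nil_of_le hge]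
  | succ n ih =>
      intro i hi
      rw [pvInnerA]
      by_cases h : i < parts.length
      · have hdrop : parts.drop i = parts[i] :: parts.drop (i + 1) :=
          (List.getElem_cons_drop h).symm
        rw [hdrop, List.findIdx?_cons]
        by_cases hx : parts[i] = k
        · simp [h, hx]
        · have hb : (parts[i] == k) = false := by simpa using hx
          have hrec := ih (i + 1) (by omega)
          simp only [h, dif_pos, hb, if_false, beq_iff_eq, hx, if_false, hrec, Option.map_map]
          cases (parts.drop (i + 1)).findIdx? (· == k) with
          | none => rfl
          | some j =>
              simp
              exact pv_join_slice_congr parts (by push_cast; ring)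
      · have hge : parts.length ≤ i := by omega
        simp [h, List.drop_eq_nil_of_le hge]

-- A's per-keyword result, rewritten through the bridges onto pv_A_spec
set_option maxHeartbeats 2000000 in
lemma pv_innerA_specF (fp kw : String) :
    pvInnerA ((PySem.Str.split? fp "/").getD []) kw 0 =
      (pvSpecF kw.toList fp.toList).map String.ofList := by
  have hparts : (PySem.Str.split? fp "/").getD [] =
      (fp.toList.splitOnP (· == '/')).map String.ofList := by
    have hso : PySem.Str.split? fp "/" =
        Option.map (List.map String.ofList) (PySem.Chars.split? fp.toList ['/']) := rfl
    rw [hso]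
    simp [PySem.Chars.split?, pv_splitOn_eq]
  rw [pv_innerA_eq _ _ (((PySem.Str.split? fp "/").getD []).length) 0 (by omega), List.drop_zero,
    hparts, List.findIdx?_map]
  have hfun : ((fun x => x == kw) ∘ String.ofList) = (fun x => x == kw.toList) := by
    funext x
    by_cases hx : x = kw.toList
    · subst hx
      simp [String.ofList_toList]
    · have h1 : String.ofList x ≠ kw := fun hh => hx (by rw [← String.toList_ofList (l := x), hh])
      simp [hx, h1]
  rw [hfun, ← pv_A_spec kw.toList fp.toList.length fp.toList (by omega), Option.map_map]
  cases (fp.toList.splitOnP (· == '/')).findIdx? (· == kw.toList) with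
  | none => rfl
  | some j =>
      simp only [Option.map_some, Function.comp]
      congr 1
      rw [PySem.List.slice_from _ (by omega)]
      have htn : (((0 + j : Nat) : Int) + 1).toNat = j + 1 := by omega
      rw [htn]
      simp only [PySem.Str.join, PySem.Chars.join]
      congr 1
      rw [show ("/" : String).toList = ['/'] from rfl]
      congr 1
      rw [List.map_drop, List.map_map]
      have hcomp : (String.toList ∘ String.ofList) = id := by
        funext x
        simp
      rw [hcomp, List.map_id]

-- B's per-keyword match, rewritten onto pv_B_spec
lemma pv_find_specF (fp kw : String) (hk : ('/' : Char) ∉ kw.toList) :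
    (if PySem.Str.find ("/" ++ fp ++ "/") ("/" ++ kw ++ "/") = -1 then none
     else some (PySem.Str.slice fp
        (some (PySem.Str.find ("/" ++ fp ++ "/") ("/" ++ kw ++ "/") + PySem.Str.len kw + 1)) none)) =
      (pvSpecF kw.toList fp.toList).map String.ofList := by
  have hpd : ("/" ++ fp ++ "/").toList = '/' :: (fp.toList ++ ['/']) := by
    rw [String.toList_append, String.toList_append, show ("/" : String).toList = ['/'] from rfl]
    simp
  have hnd : ("/" ++ kw ++ "/").toList = '/' :: (kw.toList ++ ['/']) := by
    rw [String.toList_append, String.toList_append, show ("/" : String).toList = ['/'] from rfl]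
    simp
  have hfr : PySem.Str.find ("/" ++ fp ++ "/") ("/" ++ kw ++ "/") =
      PySem.Chars.find ('/' :: (fp.toList ++ ['/'])) ('/' :: (kw.toList ++ ['/'])) := by
    rw [show PySem.Str.find ("/" ++ fp ++ "/") ("/" ++ kw ++ "/") =
      PySem.Chars.find ("/" ++ fp ++ "/").toList ("/" ++ kw ++ "/").toList from rfl, hpd, hnd]
  have hB := pv_B_spec kw.toList hk fp.toList.length fp.toList (le_refl _)
  rw [hfr, ← hB]
  by_cases hf : PySem.Chars.find ('/' :: (fp.toList ++ ['/'])) ('/' :: (kw.toList ++ ['/'])) = -1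
  · rw [if_pos hf, if_pos hf]
    rfl
  · rw [if_neg hf, if_neg hf, Option.map_some]
    congr 1
    have h0 : 0 ≤ PySem.Chars.find ('/' :: (fp.toList ++ ['/'])) ('/' :: (kw.toList ++ ['/'])) := by
      have := PySem.Chars.neg_one_le_find ('/' :: (fp.toList ++ ['/'])) ('/' :: (kw.toList ++ ['/']))
      omega
    apply String.toList_inj.mp
    rw [PySem.Str.toList_slice, PySem.Chars.slice_eq_listSlice, String.toList_ofList]
    have hlen : PySem.Str.len kw = (kw.toList.length : Int) := by
      simp [PySem.Str.len, PySem.Chars.len]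
    rw [hlen, PySem.List.slice_from _ (by omega)]
    congr 1
    omega

-- the outer loops agree keyword by keyword
lemma pv_outer_eq (fp : String) : ∀ (ks : List String),
    (∀ kw ∈ ks, ('/' : Char) ∉ kw.toList) →
    pvOuterA fp ks = pvOuterB fp ("/" ++ fp ++ "/") ks := by
  intro ks
  induction ks with
  | nil => intro _; rfl
  | cons kw rest ih =>
      intro hks
      have hk : ('/' : Char) ∉ kw.toList := hks kw (by simp)
      have hrest : ∀ w ∈ rest, ('/' : Char) ∉ w.toList := fun w hw => hks w (by simp [hw])
      have hA := pv_innerA_specF fp kw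
      have hB := pv_find_specF fp kw hk
      rw [pvOuterA, pvOuterB]
      by_cases hin : PySem.Str.isIn kw fp = true
      · rw [if_pos hin]
        cases hF : pvSpecF kw.toList fp.toList with
        | none =>
            rw [hF] at hA hB
            simp only [Option.map_none] at hA hB
            rw [hA]
            by_cases hf : PySem.Str.find ("/" ++ fp ++ "/") ("/" ++ kw ++ "/") = -1
            · rw [if_neg (not_not_intro hf)]
              exact ih hrest
            · rw [if_neg hf] at hB
              exact absurd hB (by simp)
        | some v =>
            rw [hF] at hA hB
            simp only [Option.map_some] at hA hB
            rw [hA]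
            by_cases hf : PySem.Str.find ("/" ++ fp ++ "/") ("/" ++ kw ++ "/") = -1
            · rw [if_pos hf] at hB
              exact absurd hB (by simp)
            · rw [if_neg hf] at hB
              rw [if_pos hf]
              simpa using hB.symm
      · rw [if_neg hin]
        have hninf : ¬ (kw.toList <:+: fp.toList) := fun hinf =>
          hin ((PySem.Str.isIn_iff_infix kw fp).mpr hinf)
        have hF : pvSpecF kw.toList fp.toList = none :=
          pv_specF_none kw.toList fp.toList.length fp.toList (le_refl _) hninf
        rw [hF] at hB
        simp only [Option.map_none] at hB
        by_cases hf : PySem.Str.find ("/" ++ fp ++ "/") ("/" ++ kw ++ "/") = -1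
        · rw [if_neg (not_not_intro hf)]
          exact ih hrest
        · rw [if_neg hf] at hB
          exact absurd hB (by simp)

-- ===== VERDICT (by name: the statement is the Claim_ definition above) =====
theorem clean_up_path_spec : Claim_equal_clean_up_path := by
  intro fp _
  unfold Spec_clean_up_path clean_up_path clean_up_path_alt
  exact pv_outer_eq fp pvPathKeywords (by decide)
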